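-- pv_equiv track=rewrite | github.com/Sophia0705/StudyingAlgorithm | 백준/Gold/15686. 치킨 배달/치킨 배달.py | solve
-- ===== SOURCE A (Python) =====
-- from itertools import combinations
--
-- def get_dist(houses, chicks):
--     total = 0
--     for hx, hy in houses:
--         min_dist = float('inf')
--         for cx, cy in chicks:
--             min_dist = min(min_dist, abs(hx - cx) + abs(hy - cy))
--         total += min_dist
--     return total
--
-- def solve(n, m, city):
--     houses, chicks = [], []
--
--     for r in range(n):
--         for c in range(n):
--             if city[r][c] == 1:
--                 houses.append((r, c))
--             elif city[r][c] == 2: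
--                 chicks.append((r, c))
--
--     return min(get_dist(houses, c_set) for c_set in combinations(chicks, m))
-- ===== SOURCE B (Python) =====
-- def solve(n, m, city):
--     houses = [(r, c) for r in range(n) for c in range(n) if city[r][c] == 1]
--     chicks = [(r, c) for r in range(n) for c in range(n) if city[r][c] == 2]
--
--     # best(rem, k, dmin): minimal final total over all ways to pick k more stores
--     # from rem, given the per-house running minimum distances dmin (None = no
--     # store chosen yet for that house).  None result = no feasible selection.
--     def best(rem, k, dmin):
--         if k == 0:
--             return sum(dmin)
--         if len(rem) < k:
--             return None
--         (cx, cy), rest = rem[0], rem[1:]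
--         upd = [d2 if d is None else min(d, d2)
--                for d, d2 in zip(dmin, [abs(hx - cx) + abs(hy - cy) for hx, hy in houses])]
--         take = best(rest, k - 1, upd)
--         skip = best(rest, k, dmin)
--         if take is None:
--             return skip
--         if skip is None:
--             return take
--         return min(take, skip)
--
--     return best(chicks, m, [None] * len(houses))
-- ===== Notes on version B (the rewrite author's own statement) =====
-- stated objective: alternative
-- what changed: B replaces A's enumeration of all m-subsets of store coordinates with per-subset distance recomputation by a binary include/exclude recursion over the store list that carries a per-house running-minimum distance vector and combines the two branch results with min, never materializing subsets.
-- outside the precondition, e.g. on solve(2, 0, [[1, 0], [0, 0]]): A returns inf, B raises TypeError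
import Mathlib
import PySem

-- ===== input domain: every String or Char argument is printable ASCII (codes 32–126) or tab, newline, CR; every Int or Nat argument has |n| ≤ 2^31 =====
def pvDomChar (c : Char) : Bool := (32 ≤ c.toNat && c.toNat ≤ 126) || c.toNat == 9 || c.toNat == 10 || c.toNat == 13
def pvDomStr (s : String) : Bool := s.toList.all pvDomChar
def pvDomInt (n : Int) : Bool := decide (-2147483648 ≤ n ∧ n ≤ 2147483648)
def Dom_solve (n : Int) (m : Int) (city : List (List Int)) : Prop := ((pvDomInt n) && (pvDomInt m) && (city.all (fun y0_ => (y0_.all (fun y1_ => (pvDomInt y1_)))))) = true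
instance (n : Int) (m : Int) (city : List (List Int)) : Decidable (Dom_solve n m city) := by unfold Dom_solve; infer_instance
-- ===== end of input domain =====

-- B replaces the enumeration of m-subsets of stores (itertools.combinations + per-subset distance
-- sums) by an include/exclude recursion over the store list carrying per-house running minimum
-- distances (objective: alternative).

-- ===== PORT A =====
def pyAbs (x : Int) : Int := if x < 0 then -x else x

-- get_dist: min_dist starts at float('inf'), modelled as `none`; `md.getD 0` is only read
-- off the `none` branch outside Pre_solve (Python would return float inf there).
def getDist (houses chicks : List (Int × Int)) : Int :=
  houses.foldl (fun total h =>
    total + (chicks.foldl (fun (md : Option Int) c =>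
      match md with
      | none => some (pyAbs (h.1 - c.1) + pyAbs (h.2 - c.2))
      | some v => some (min v (pyAbs (h.1 - c.1) + pyAbs (h.2 - c.2)))) none).getD 0) 0

def solve (n : Int) (m : Int) (city : List (List Int)) : Int :=
  let acc := (PySem.List.pyRange 0 n 1).foldl
    (fun (acc : List (Int × Int) × List (Int × Int)) r =>
      (PySem.List.pyRange 0 n 1).foldl (fun acc c =>
        let v := PySem.List.pyGetD (PySem.List.pyGetD city r []) c 0
        if v == 1 then (acc.1 ++ [(r, c)], acc.2)
        else if v == 2 then (acc.1, acc.2 ++ [(r, c)])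
        else acc) acc)
    ([], [])
  -- min(...) raises on an empty generator; Pre_solve keeps it nonempty, `.getD 0` is unread there
  (PySem.List.min? ((PySem.List.combinations acc.2 m.toNat).map (fun cset => getDist acc.1 cset))
    (fun x => x)).getD 0

-- ===== PORT B =====
-- the updated running-minimum list (the `upd` comprehension of Source B)
def updB (houses : List (Int × Int)) (c : Int × Int) (dmin : List (Option Int)) : List (Option Int) :=
  (dmin.zip (houses.map (fun h => pyAbs (h.1 - c.1) + pyAbs (h.2 - c.2)))).map
    (fun p => match p.1 with | none => some p.2 | some d => some (min d p.2))

-- best(rem, k, dmin); `none` = Python None (no feasible selection).  sum(dmin) with a None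
-- entry raises TypeError in Python; that happens only outside Pre_solve, where `.getD 0`
-- stands in.  The `[] => none` arm is only reachable for k < 0, also outside Pre_solve.
def bestB (houses : List (Int × Int)) : List (Int × Int) → Int → List (Option Int) → Option Int
  | rem, k, dmin =>
    if k == 0 then some ((dmin.map (fun d => d.getD 0)).sum)
    else if (rem.length : Int) < k then none
    else
      match rem with
      | [] => none
      | c :: rest =>
        match bestB houses rest (k - 1) (updB houses c dmin), bestB houses rest k dmin with
        | none, s => s
        | some t, none => some t
        | some t, some s => some (min t s)

def solve_alt (n : Int) (m : Int) (city : List (List Int)) : Int :=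
  let houses := (PySem.List.pyRange 0 n 1).flatMap (fun r =>
    ((PySem.List.pyRange 0 n 1).filter (fun c =>
      PySem.List.pyGetD (PySem.List.pyGetD city r []) c 0 == 1)).map (fun c => (r, c)))
  let chicks := (PySem.List.pyRange 0 n 1).flatMap (fun r =>
    ((PySem.List.pyRange 0 n 1).filter (fun c =>
      PySem.List.pyGetD (PySem.List.pyGetD city r []) c 0 == 2)).map (fun c => (r, c)))
  (bestB houses chicks m (List.replicate houses.length none)).getD 0

-- ===== PRECONDITION & SPEC =====
-- Pre_ excludes exactly the inputs where Python A does not return an int: out-of-range grid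
-- indexing (IndexError), m < 0 or m > #stores (min over an empty generator, ValueError), and
-- m = 0 with at least one house, where A returns float('inf'), not an int (see claim cites).
def Pre_solve (n : Int) (m : Int) (city : List (List Int)) : Prop :=
  n ≤ (city.length : Int) ∧
  (∀ row ∈ city.take n.toNat, n ≤ (row.length : Int)) ∧
  0 ≤ m ∧
  m ≤ (((city.take n.toNat).map (fun row => (row.take n.toNat).count 2)).sum : Int) ∧
  ((((city.take n.toNat).map (fun row => (row.take n.toNat).count 1)).sum = 0) ∨ 1 ≤ m)
instance (n : Int) (m : Int) (city : List (List Int)) : Decidable (Pre_solve n m city) := by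
  unfold Pre_solve; infer_instance

def pvWitness_solve : Int × Int × List (List Int) := (2, 1, [[1, 0], [0, 2]])

def Spec_solve (n : Int) (m : Int) (city : List (List Int)) (out : Int) : Prop := out = solve_alt n m city
instance (n : Int) (m : Int) (city : List (List Int)) (out : Int) : Decidable (Spec_solve n m city out) := by unfold Spec_solve; infer_instance

-- ===== CLAIM (what is proved, stated in full; the proofs are below) =====
def Claim_equal_solve : Prop := ∀ (n : Int) (m : Int) (city : List (List Int)), Dom_solve n m city → Pre_solve n m city → Spec_solve n m city (solve n m city)

-- ===== LEMMAS AND PROOFS =====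

-- A's single two-accumulator loop equals the two filter-comprehensions of B (inner row loop).
theorem innerFoldEq {α β : Type} (p q : α → Bool) (f : α → β)
    (hpq : ∀ c, p c = true → q c = false) :
    ∀ (l : List α) (a b : List β),
      l.foldl (fun (acc : List β × List β) c =>
        if p c then (acc.1 ++ [f c], acc.2)
        else if q c then (acc.1, acc.2 ++ [f c]) else acc) (a, b)
      = (a ++ (l.filter p).map f, b ++ (l.filter q).map f) := by
  intro l
  induction l with
  | nil => intro a b; simp
  | cons x t ih =>
    intro a b
    by_cases hp : p x = true
    · simp [List.foldl_cons, hp, hpq x hp, ih]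
    · by_cases hq : q x = true
      · simp [List.foldl_cons, hp, hq, ih]
      · simp [List.foldl_cons, hp, hq, ih]

-- the whole grid scan: A's pair accumulator = (B's houses, B's chicks)
theorem gridFoldEq (n : Int) (city : List (List Int)) :
    (PySem.List.pyRange 0 n 1).foldl
      (fun (acc : List (Int × Int) × List (Int × Int)) r =>
        (PySem.List.pyRange 0 n 1).foldl (fun acc c =>
          let v := PySem.List.pyGetD (PySem.List.pyGetD city r []) c 0
          if v == 1 then (acc.1 ++ [(r, c)], acc.2)
          else if v == 2 then (acc.1, acc.2 ++ [(r, c)])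
          else acc) acc)
      ([], [])
    = ((PySem.List.pyRange 0 n 1).flatMap (fun r =>
        ((PySem.List.pyRange 0 n 1).filter (fun c =>
          PySem.List.pyGetD (PySem.List.pyGetD city r []) c 0 == 1)).map (fun c => (r, c))),
       (PySem.List.pyRange 0 n 1).flatMap (fun r =>
        ((PySem.List.pyRange 0 n 1).filter (fun c =>
          PySem.List.pyGetD (PySem.List.pyGetD city r []) c 0 == 2)).map (fun c => (r, c)))) := by
  rw [PySem.List.foldl_congr_mem
    (g := fun (acc : List (Int × Int) × List (Int × Int)) r =>
      (acc.1 ++ ((PySem.List.pyRange 0 n 1).filter (fun c =>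
          PySem.List.pyGetD (PySem.List.pyGetD city r []) c 0 == 1)).map (fun c => (r, c)),
       acc.2 ++ ((PySem.List.pyRange 0 n 1).filter (fun c =>
          PySem.List.pyGetD (PySem.List.pyGetD city r []) c 0 == 2)).map (fun c => (r, c))))]
  · rw [PySem.List.foldl_prod_mk
      (f := fun (acc : List (Int × Int)) r =>
        acc ++ ((PySem.List.pyRange 0 n 1).filter (fun c =>
          PySem.List.pyGetD (PySem.List.pyGetD city r []) c 0 == 1)).map (fun c => (r, c)))
      (g := fun (acc : List (Int × Int)) r =>
        acc ++ ((PySem.List.pyRange 0 n 1).filter (fun c =>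
          PySem.List.pyGetD (PySem.List.pyGetD city r []) c 0 == 2)).map (fun c => (r, c)))]
    rw [PySem.List.foldl_append_eq_flatMap, PySem.List.foldl_append_eq_flatMap]
    simp
  · intro acc r _
    obtain ⟨a, b⟩ := acc
    exact innerFoldEq
      (fun c => PySem.List.pyGetD (PySem.List.pyGetD city r []) c 0 == 1)
      (fun c => PySem.List.pyGetD (PySem.List.pyGetD city r []) c 0 == 2)
      (fun c => (r, c))
      (by intro c h1; simp_all)
      (PySem.List.pyRange 0 n 1) a b

-- value of a selection `sel` of stores given running minima `dmin` per house
def valB (houses : List (Int × Int)) (dmin : List (Option Int)) (sel : List (Int × Int)) : Int :=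
  ((dmin.zip houses).map (fun p => (sel.foldl (fun (md : Option Int) c =>
      match md with
      | none => some (pyAbs (p.2.1 - c.1) + pyAbs (p.2.2 - c.2))
      | some v => some (min v (pyAbs (p.2.1 - c.1) + pyAbs (p.2.2 - c.2)))) p.1).getD 0)).sum

def ominB : Option Int → Option Int → Option Int
  | none, s => s
  | some t, none => some t
  | some t, some s => some (min t s)

def minV : List Int → Option Int
  | [] => none
  | x :: t => some (t.foldl min x)

theorem foldl_min_shift : ∀ (l : List Int) (u v : Int),
    l.foldl min (min u v) = min u (l.foldl min v) := by
  intro l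
  induction l with
  | nil => intro u v; simp
  | cons z t ih =>
    intro u v
    simp only [List.foldl_cons]
    rw [min_assoc, ih]

theorem minV_append : ∀ (a b : List Int), minV (a ++ b) = ominB (minV a) (minV b) := by
  intro a b
  cases a with
  | nil => rfl
  | cons x ta =>
    cases b with
    | nil => simp [minV, ominB]
    | cons y tb =>
      simp only [List.cons_append, minV, List.foldl_append, List.foldl_cons, ominB]
      rw [foldl_min_shift]

theorem min?_id_eq_minV (l : List Int) :
    PySem.List.min? l (fun x => x) = minV l := by
  cases l with
  | nil => simp [PySem.List.min?, minV]
  | cons x t => rw [PySem.List.min?_id_cons]; rfl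

theorem zip_fst_map : ∀ (a : List (Option Int)) (b : List (Int × Int)), a.length = b.length →
    (a.zip b).map (fun p => p.1.getD 0) = a.map (fun d => d.getD 0) := by
  intro a
  induction a with
  | nil => intro b _; simp
  | cons d ds ih =>
    intro b hlen
    cases b with
    | nil => simp at hlen
    | cons h hs =>
      simp only [List.zip_cons_cons, List.map_cons]
      rw [ih hs (by simpa using hlen)]

theorem valB_nil_len (houses : List (Int × Int)) (dmin : List (Option Int))
    (hlen : dmin.length = houses.length) :
    valB houses dmin [] = (dmin.map (fun d => d.getD 0)).sum := by
  unfold valB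
  simp only [List.foldl_nil]
  rw [zip_fst_map dmin houses hlen]

theorem updB_length (houses : List (Int × Int)) (c : Int × Int) (dmin : List (Option Int))
    (hlen : dmin.length = houses.length) : (updB houses c dmin).length = houses.length := by
  unfold updB
  simp [hlen]

theorem valB_cons (c : Int × Int) (sel : List (Int × Int)) :
    ∀ (houses : List (Int × Int)) (dmin : List (Option Int)),
    valB houses dmin (c :: sel) = valB houses (updB houses c dmin) sel := by
  intro houses
  induction houses with
  | nil => intro dmin; simp [valB, updB]
  | cons h hs ih =>
    intro dmin
    cases dmin with
    | nil => simp [valB, updB]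
    | cons d ds =>
      simp only [valB, updB, List.map_cons, List.zip_cons_cons, List.sum_cons,
        List.foldl_cons]
      have tail := ih ds
      simp only [valB, updB] at tail
      rw [← tail]
      cases d <;> rfl

theorem bestB_eq (houses : List (Int × Int)) :
    ∀ (rem : List (Int × Int)) (kn : Nat) (dmin : List (Option Int)),
      dmin.length = houses.length →
      bestB houses rem (kn : Int) dmin
        = minV ((PySem.List.combinations rem kn).map (valB houses dmin)) := by
  intro rem
  induction rem with
  | nil =>
    intro kn dmin hlen
    cases kn with
    | zero =>
      rw [bestB]
      simp only [PySem.List.combinations_zero, List.map_cons, List.map_nil]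
      simp [minV, valB_nil_len _ _ hlen]
    | succ k =>
      rw [bestB]
      have h0 : ¬ ((((k + 1 : Nat) : Int)) == 0) = true := by
        simp only [beq_iff_eq]; push_cast; omega
      rw [if_neg h0]
      have h2 : ((([] : List (Int × Int)).length : Int) < ((k + 1 : Nat) : Int)) := by
        simp only [List.length_nil]; push_cast; omega
      rw [if_pos h2, PySem.List.combinations_nil_succ]
      rfl
  | cons c rest ih =>
    intro kn dmin hlen
    cases kn with
    | zero =>
      rw [bestB]
      simp only [PySem.List.combinations_zero, List.map_cons, List.map_nil]
      simp [minV, valB_nil_len _ _ hlen]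
    | succ k =>
      rw [bestB]
      have h0 : ¬ ((((k + 1 : Nat) : Int)) == 0) = true := by
        simp only [beq_iff_eq]; push_cast; omega
      rw [if_neg h0]
      by_cases hsz : (c :: rest).length < k + 1
      · have hg : (((c :: rest).length : Int) < ((k + 1 : Nat) : Int)) := by
          push_cast at hsz ⊢; omega
        rw [if_pos hg, PySem.List.combinations_eq_nil_of_length_lt _ hsz]
        rfl
      · have hg : ¬ (((c :: rest).length : Int) < ((k + 1 : Nat) : Int)) := by
          push_cast at hsz ⊢; omega
        rw [if_neg hg]
        have hk1 : ((k + 1 : Nat) : Int) - 1 = ((k : Nat) : Int) := by push_cast; ring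
        rw [hk1]
        rw [ih k (updB houses c dmin) (updB_length houses c dmin hlen)]
        rw [ih (k + 1) dmin hlen]
        rw [PySem.List.combinations_cons_succ]
        rw [List.map_append, minV_append, List.map_map]
        have hcomp : (valB houses dmin ∘ fun s => c :: s) = valB houses (updB houses c dmin) := by
          funext s
          exact valB_cons c s houses dmin
        rw [hcomp]
        cases minV ((PySem.List.combinations rest k).map (valB houses (updB houses c dmin))) with
        | none =>
          cases minV ((PySem.List.combinations rest (k + 1)).map (valB houses dmin)) <;> rfl
        | some t =>
          cases minV ((PySem.List.combinations rest (k + 1)).map (valB houses dmin)) <;> rfl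

theorem getDist_eq_valB (houses sel : List (Int × Int)) :
    getDist houses sel = valB houses (List.replicate houses.length none) sel := by
  have main : ∀ (hs : List (Int × Int)) (a : Int),
      hs.foldl (fun total h =>
        total + (sel.foldl (fun (md : Option Int) c =>
          match md with
          | none => some (pyAbs (h.1 - c.1) + pyAbs (h.2 - c.2))
          | some v => some (min v (pyAbs (h.1 - c.1) + pyAbs (h.2 - c.2)))) none).getD 0) a
      = a + valB hs (List.replicate hs.length none) sel := by
    intro hs
    induction hs with
    | nil => intro a; simp [valB]
    | cons h t ih =>
      intro a
      simp only [List.foldl_cons, ih]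
      simp only [valB, List.length_cons, List.replicate_succ, List.zip_cons_cons,
        List.map_cons, List.sum_cons]
      ring
  unfold getDist
  rw [main houses 0]
  simp

-- main equality of the two ports, for 0 ≤ m (Pre_solve gives it; for m < 0 Python A raises)
theorem ports_eq (n : Int) (m : Int) (city : List (List Int)) (hm : 0 ≤ m) :
    solve n m city = solve_alt n m city := by
  unfold solve solve_alt
  rw [gridFoldEq]
  simp only
  set houses := (PySem.List.pyRange 0 n 1).flatMap (fun r =>
    ((PySem.List.pyRange 0 n 1).filter (fun c =>
      PySem.List.pyGetD (PySem.List.pyGetD city r []) c 0 == 1)).map (fun c => (r, c))) with hH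
  set chicks := (PySem.List.pyRange 0 n 1).flatMap (fun r =>
    ((PySem.List.pyRange 0 n 1).filter (fun c =>
      PySem.List.pyGetD (PySem.List.pyGetD city r []) c 0 == 2)).map (fun c => (r, c))) with hC
  have hm' : ((m.toNat : Nat) : Int) = m := Int.toNat_of_nonneg hm
  rw [← hm']
  rw [bestB_eq houses chicks m.toNat (List.replicate houses.length none) (by simp)]
  rw [min?_id_eq_minV]
  congr 2
  apply List.map_congr_left
  intro sel _
  exact getDist_eq_valB houses sel

-- ===== VERDICT (by name: the statement is the Claim_ definition above) =====
theorem solve_spec : Claim_equal_solve := by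
  intro n m city _ hpre
  unfold Spec_solve
  exact ports_eq n m city hpre.2.2.1
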